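-- pv_equiv track=rewrite | github.com/snakkez/stego_kurs_mtuci | helpers/array_slicer.py | merge_from_subarrays
-- ===== SOURCE A (Python) =====
-- from itertools import chain
--
-- def merge_from_subarrays(subarrays, slice_dim=8):
--     dim_y_s = len(subarrays)
--     dim_x_s = len(subarrays[0])
--
--     unsliced = []
--     for s_y in range(dim_y_s):
--         for s_d in range(slice_dim):
--             for s_x in range(dim_x_s):
--                 unsliced.append(subarrays[s_y][s_x][s_d])
--
--     unsliced_rowed = [unsliced[i:i+dim_x_s] for i in range(0, len(unsliced), dim_x_s)]
--     array = [list(chain.from_iterable(row)) for row in unsliced_rowed]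
--     return array
-- ===== SOURCE B (Python) =====
-- def merge_from_subarrays(subarrays, slice_dim=8):
--     # Transposed (column-major) traversal: preallocate all output rows, then
--     # scan the input one column s_x at a time, appending each cell to the row
--     # it belongs to.  Correct because output row (s_y, s_d) is the
--     # concatenation over s_x of subarrays[s_y][s_x][s_d], and cells arrive in
--     # increasing s_x order for every row.
--     dim_x_s = len(subarrays[0])
--     rows = [[] for _ in range(len(subarrays) * slice_dim)]
--     for s_x in range(dim_x_s):
--         for s_y in range(len(subarrays)):
--             for s_d in range(slice_dim):
--                 rows[s_y * slice_dim + s_d].extend(subarrays[s_y][s_x][s_d])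
--     return rows
-- ===== Notes on version B (the rewrite author's own statement) =====
-- stated objective: alternative
-- what changed: B replaces A's build-flat-list-then-rechunk-then-flatten pipeline by a transposed traversal: it preallocates all len(subarrays)*slice_dim output rows and scans the input column by column (s_x outermost), appending each cell directly to its destination row rows[s_y*slice_dim+s_d].
import Mathlib
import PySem

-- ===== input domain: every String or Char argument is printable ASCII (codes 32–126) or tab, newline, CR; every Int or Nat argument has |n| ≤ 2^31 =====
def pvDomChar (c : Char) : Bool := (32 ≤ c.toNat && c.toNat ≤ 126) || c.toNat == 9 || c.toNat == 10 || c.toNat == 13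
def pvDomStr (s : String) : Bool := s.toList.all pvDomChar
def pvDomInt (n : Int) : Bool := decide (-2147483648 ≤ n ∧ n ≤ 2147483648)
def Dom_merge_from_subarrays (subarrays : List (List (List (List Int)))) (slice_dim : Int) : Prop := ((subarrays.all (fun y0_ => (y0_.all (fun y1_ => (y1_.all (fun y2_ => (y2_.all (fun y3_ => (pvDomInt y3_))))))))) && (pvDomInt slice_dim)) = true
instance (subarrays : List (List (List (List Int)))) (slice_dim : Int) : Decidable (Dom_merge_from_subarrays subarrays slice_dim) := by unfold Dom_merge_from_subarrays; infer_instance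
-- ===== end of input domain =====

-- B replaces A's flat-list + modular re-chunk + flatten pipeline by a transposed traversal: preallocated rows, input scanned column-by-column (s_x outermost), each cell appended to its destination row; same cost, different shape.


-- ===== PORT A =====
-- Indexing subarrays[s_y][s_x][s_d] is ported with pyGetD (default []); Pre_ admits exactly the
-- in-range inputs, on which pyGetD agrees with Python's indexing.
def merge_from_subarrays (subarrays : List (List (List (List Int)))) (slice_dim : Int) : List (List Int) :=
  let dim_y_s : Int := (subarrays.length : Int)
  let dim_x_s : Int := ((PySem.List.pyGetD subarrays 0 []).length : Int)
  let unsliced : List (List Int) :=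
    (PySem.List.pyRange 0 dim_y_s 1).foldl (fun acc s_y =>
      (PySem.List.pyRange 0 slice_dim 1).foldl (fun acc s_d =>
        (PySem.List.pyRange 0 dim_x_s 1).foldl (fun acc s_x =>
          acc ++ [PySem.List.pyGetD (PySem.List.pyGetD (PySem.List.pyGetD subarrays s_y []) s_x []) s_d []]) acc) acc) []
  let unsliced_rowed : List (List (List Int)) :=
    (PySem.List.pyRange 0 (unsliced.length : Int) dim_x_s).map
      (fun i => PySem.List.slice unsliced (some i) (some (i + dim_x_s)))
  unsliced_rowed.map (fun row => row.flatten)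

-- ===== PORT B =====
-- rows[s_y*slice_dim + s_d].extend(cell): the index is always ≥ 0 when the loops run, so .toNat is exact.
def merge_from_subarrays_alt (subarrays : List (List (List (List Int)))) (slice_dim : Int) : List (List Int) :=
  let dim_x_s : Int := ((PySem.List.pyGetD subarrays 0 []).length : Int)
  let rows : List (List Int) :=
    (PySem.List.pyRange 0 ((subarrays.length : Int) * slice_dim) 1).map (fun _ => [])
  (PySem.List.pyRange 0 dim_x_s 1).foldl (fun rows s_x =>
    (PySem.List.pyRange 0 (subarrays.length : Int) 1).foldl (fun rows s_y =>
      (PySem.List.pyRange 0 slice_dim 1).foldl (fun rows s_d =>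
        rows.modify (s_y * slice_dim + s_d).toNat
          (fun row => row ++ PySem.List.pyGetD (PySem.List.pyGetD (PySem.List.pyGetD subarrays s_y []) s_x []) s_d [])) rows) rows) rows

-- ===== PRECONDITION & SPEC =====
-- Pre_ = exactly the inputs on which Python A returns: subarrays non-empty, subarrays[0] non-empty
-- (else IndexError / ValueError from range step 0), and, when slice_dim > 0, every accessed index
-- in range (rows have ≥ len(subarrays[0]) columns, accessed columns have ≥ slice_dim entries).
def Pre_merge_from_subarrays (subarrays : List (List (List (List Int)))) (slice_dim : Int) : Prop :=
  subarrays ≠ [] ∧ 0 < subarrays.headI.length ∧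
  (0 < slice_dim → ∀ r ∈ subarrays, subarrays.headI.length ≤ r.length ∧
    ∀ c ∈ r.take subarrays.headI.length, slice_dim ≤ (c.length : Int))
instance (subarrays : List (List (List (List Int)))) (slice_dim : Int) : Decidable (Pre_merge_from_subarrays subarrays slice_dim) := by unfold Pre_merge_from_subarrays; infer_instance
def pvWitness_merge_from_subarrays : List (List (List (List Int))) × Int := ([[[[1],[2]],[[3],[4]]]], 2)

def Spec_merge_from_subarrays (subarrays : List (List (List (List Int)))) (slice_dim : Int) (out : List (List Int)) : Prop := out = merge_from_subarrays_alt subarrays slice_dim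
instance (subarrays : List (List (List (List Int)))) (slice_dim : Int) (out : List (List Int)) : Decidable (Spec_merge_from_subarrays subarrays slice_dim out) := by unfold Spec_merge_from_subarrays; infer_instance

-- ===== CLAIM (what is proved, stated in full; the proofs are below) =====
def Claim_equal_merge_from_subarrays : Prop := ∀ (subarrays : List (List (List (List Int)))) (slice_dim : Int), Dom_merge_from_subarrays subarrays slice_dim → Pre_merge_from_subarrays subarrays slice_dim → Spec_merge_from_subarrays subarrays slice_dim (merge_from_subarrays subarrays slice_dim)

-- ===== LEMMAS AND PROOFS =====

-- the (s_y, s_x, s_d) element both ports read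
def pvGet (subarrays : List (List (List (List Int)))) (y x d : Int) : List Int :=
  PySem.List.pyGetD (PySem.List.pyGetD (PySem.List.pyGetD subarrays y []) x []) d []

-- the list of output rows, still unflattened: one block of dim_x_s cells per (s_y, s_d)
def pvBlocks (subarrays : List (List (List (List Int)))) (slice_dim dx : Int) : List (List (List Int)) :=
  (PySem.List.pyRange 0 (subarrays.length : Int) 1).flatMap (fun y =>
    (PySem.List.pyRange 0 slice_dim 1).map (fun d =>
      (PySem.List.pyRange 0 dx 1).map (fun x => pvGet subarrays y x d)))

lemma pvDropFlatten {α : Type} (k : Nat) (j : Nat) (blocks : List (List α))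
    (hlen : ∀ b ∈ blocks, b.length = k) :
    blocks.flatten.drop (k * j) = (blocks.drop j).flatten := by
  induction j generalizing blocks with
  | zero => simp
  | succ j ih =>
    cases blocks with
    | nil => simp
    | cons b t =>
      have hb : b.length = k := hlen b (by simp)
      have harith : k * (j + 1) = b.length + k * j := by rw [hb]; ring
      rw [List.flatten_cons, harith, ← List.drop_drop, List.drop_left,
        List.drop_succ_cons, ih t (fun b hb' => hlen b (by simp [hb']))]

lemma pvChunkAt {α : Type} (k : Nat) (blocks : List (List α))
    (hlen : ∀ b ∈ blocks, b.length = k) (j : Nat) (hj : j < blocks.length) :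
    (blocks.flatten.drop (k * j)).take k = blocks[j] := by
  rw [pvDropFlatten k j blocks hlen, List.drop_eq_getElem_cons hj, List.flatten_cons,
    ← hlen blocks[j] (List.getElem_mem hj), List.take_left]

-- re-chunking a concatenation of equal-length blocks recovers the blocks
lemma pvChunk {α : Type} (blocks : List (List α)) (k : Nat) (hk : 0 < k)
    (hlen : ∀ b ∈ blocks, b.length = k) :
    (PySem.List.pyRange 0 (blocks.flatten.length : Int) (k : Int)).map
      (fun i => PySem.List.slice blocks.flatten (some i) (some (i + (k : Int)))) = blocks := by
  have hn : blocks.flatten.length = blocks.length * k := by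
    have h1 : blocks.map List.length = List.replicate (blocks.map List.length).length k :=
      List.eq_replicate_of_mem (by
        intro b hb
        obtain ⟨c, hc, rfl⟩ := List.mem_map.mp hb
        exact hlen c hc)
    rw [List.length_flatten, h1, List.sum_replicate, smul_eq_mul, List.length_map]
  have hkz : (0 : Int) < (k : Int) := by exact_mod_cast hk
  rw [PySem.List.pyRange_of_pos _ _ hkz]
  have hcnt : (if (0 : Int) < (blocks.flatten.length : Int) then
      (((blocks.flatten.length : Int) - 0 + (k : Int) - 1) / (k : Int)).toNat else 0) = blocks.length := by
    rw [hn]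
    split_ifs with h
    · have e1 : ((blocks.length * k : Nat) : Int) - 0 + (k : Int) - 1
          = ((k : Int) - 1) + (blocks.length : Int) * (k : Int) := by push_cast; ring
      rw [e1, Int.add_mul_ediv_right _ _ (by omega),
        Int.ediv_eq_zero_of_lt (by omega) (by omega)]
      simp
    · have : blocks.length * k = 0 := by
        by_contra hne
        exact h (by exact_mod_cast Nat.pos_of_ne_zero hne)
      rcases Nat.mul_eq_zero.mp this with h0 | h0 <;> omega
  rw [hcnt]
  apply List.ext_getElem
  · simp
  · intro j h1 h2
    simp only [List.getElem_map, List.getElem_range]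
    have e2 : (0 : Int) + (k : Int) * (j : Int) = ((k * j : Nat) : Int) := by push_cast; ring
    rw [e2, PySem.List.slice_natCast_add, pvChunkAt k blocks hlen j h2]

lemma pvA_eq (subarrays : List (List (List (List Int)))) (slice_dim : Int)
    (hdx : 0 < ((PySem.List.pyGetD subarrays 0 []).length : Int)) :
    merge_from_subarrays subarrays slice_dim =
      (pvBlocks subarrays slice_dim ((PySem.List.pyGetD subarrays 0 []).length : Int)).map List.flatten := by
  unfold merge_from_subarrays
  simp only [PySem.List.foldl_append_singleton_eq_map, PySem.List.foldl_append_eq_flatMap,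
    List.nil_append]
  have hun : ((PySem.List.pyRange 0 (subarrays.length : Int) 1).flatMap (fun s_y =>
      (PySem.List.pyRange 0 slice_dim 1).flatMap (fun s_d =>
        (PySem.List.pyRange 0 ((PySem.List.pyGetD subarrays 0 []).length : Int) 1).map
          (fun s_x => PySem.List.pyGetD (PySem.List.pyGetD (PySem.List.pyGetD subarrays s_y []) s_x []) s_d []))))
      = (pvBlocks subarrays slice_dim ((PySem.List.pyGetD subarrays 0 []).length : Int)).flatten := by
    unfold pvBlocks pvGet
    simp [List.flatMap_def, List.flatten_flatten, List.map_map, Function.comp_def]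
  rw [hun]
  rw [pvChunk _ ((PySem.List.pyGetD subarrays 0 []).length) (by exact_mod_cast hdx)]
  intro b hb
  unfold pvBlocks at hb
  obtain ⟨y, hy, hb2⟩ := List.mem_flatMap.mp hb
  obtain ⟨d, hd, rfl⟩ := List.mem_map.mp hb2
  simp [PySem.List.length_pyRange_one]

-- ---------- B side: the transposed accumulation ----------

-- pyRange 0 n 1 as a mapped Nat range
lemma pvRangeNat (n : Nat) :
    PySem.List.pyRange 0 (n : Int) 1 = (List.range n).map (fun k : Nat => (k : Int)) := by
  rw [PySem.List.pyRange_one, show ((n : Int) - 0).toNat = n by omega]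
  exact List.map_congr_left (fun k _ => by omega)

-- B's loop nest, re-indexed over Nat
def pvLoopB (s : List (List (List (List Int)))) (S : Nat) (xs : List Nat)
    (r : List (List Int)) : List (List Int) :=
  xs.foldl (fun r (x : Nat) =>
    (List.range s.length).foldl (fun r y =>
      (List.range S).foldl (fun r d =>
        r.modify (y * S + d) (fun row => row ++ pvGet s (y : Int) (x : Int) (d : Int))) r) r) r

-- inner d-loop, pointwise
lemma pvDfold (c : Nat → List Int) (base : Nat) (S : Nat) (r : List (List Int)) (j : Nat) :
    ((List.range S).foldl (fun r d => r.modify (base + d) (fun row => row ++ c d)) r)[j]?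
      = if base ≤ j ∧ j < base + S then (r[j]?.map (· ++ c (j - base))) else r[j]? := by
  induction S generalizing r with
  | zero => simp
  | succ S ih =>
    rw [List.range_succ, List.foldl_append, List.foldl_cons, List.foldl_nil,
      List.getElem?_modify, ih]
    by_cases h1 : base + S = j
    · subst h1
      simp
    · by_cases h2 : base ≤ j ∧ j < base + S
      · have h3 : base ≤ j ∧ j < base + (S + 1) := by omega
        simp only [if_pos h2, if_pos h3]
        cases r[j]? <;> simp [h1]
      · have h3 : ¬ (base ≤ j ∧ j < base + (S + 1)) := by omega
        simp only [if_neg h2, if_neg h3]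
        cases r[j]? <;> simp [h1]

-- middle y-loop, pointwise
lemma pvYfold (c : Nat → Nat → List Int) (S N : Nat) (r : List (List Int)) (j : Nat) :
    ((List.range N).foldl (fun r y =>
        (List.range S).foldl (fun r d => r.modify (y * S + d) (fun row => row ++ c y d)) r) r)[j]?
      = if j < N * S then (r[j]?.map (· ++ c (j / S) (j % S))) else r[j]? := by
  induction N generalizing r with
  | zero => simp
  | succ N ih =>
    rw [List.range_succ, List.foldl_append, List.foldl_cons, List.foldl_nil, pvDfold, ih]
    have hc2 : (N + 1) * S = N * S + S := by ring
    by_cases h1 : N * S ≤ j ∧ j < N * S + S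
    · have hS : 0 < S := by omega
      obtain ⟨r', hj⟩ : ∃ r', j = N * S + r' := ⟨j - N * S, by omega⟩
      subst hj
      have hr : r' < S := by omega
      have hdiv : (N * S + r') / S = N := by
        rw [Nat.mul_comm, Nat.mul_add_div hS, Nat.div_eq_of_lt hr]; omega
      have hmod : (N * S + r') % S = r' := by
        rw [Nat.mul_comm, Nat.mul_add_mod, Nat.mod_eq_of_lt hr]
      have h2 : ¬ N * S + r' < N * S := by omega
      have h3 : N * S + r' < (N + 1) * S := by omega
      simp [hr, h3, hdiv, hmod]
    · by_cases h2 : j < N * S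
      · have h3 : j < (N + 1) * S := by omega
        simp [if_neg h1, if_pos h2, if_pos h3]
      · have h3 : ¬ j < (N + 1) * S := by omega
        simp [if_neg h1, if_neg h2, if_neg h3]

-- whole loop nest, pointwise
lemma pvLoopB_getElem? (s : List (List (List (List Int)))) (S : Nat) (xs : List Nat)
    (r : List (List Int)) (j : Nat) :
    (pvLoopB s S xs r)[j]?
      = if j < s.length * S then
          (r[j]?.map (· ++ (xs.map (fun x : Nat => pvGet s ((j / S : Nat) : Int) (x : Int) ((j % S : Nat) : Int))).flatten))
        else r[j]? := by
  induction xs generalizing r with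
  | nil => simp [pvLoopB]
  | cons x xs ih =>
    rw [pvLoopB, List.foldl_cons, ← pvLoopB, ih, pvYfold]
    by_cases h : j < s.length * S
    · simp only [if_pos h]
      cases r[j]? <;> simp
    · simp [if_neg h]

-- B's port equals the Nat-indexed loop nest (for slice_dim = ↑S)
lemma pvB_loop (s : List (List (List (List Int)))) (S : Nat) :
    merge_from_subarrays_alt s (S : Int)
      = pvLoopB s S (List.range (PySem.List.pyGetD s 0 []).length)
          (List.replicate (s.length * S) []) := by
  simp only [merge_from_subarrays_alt, pvLoopB]
  rw [show ((s.length : Int) * (S : Int)) = ((s.length * S : Nat) : Int) by push_cast; ring]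
  simp only [pvRangeNat, List.foldl_map, List.map_const', List.length_map, List.length_range]
  have hidx : ∀ y d : Nat, ((y : Int) * (S : Int) + (d : Int)).toNat = y * S + d := fun y d => by
    rw [show (y : Int) * (S : Int) + (d : Int) = ((y * S + d : Nat) : Int) by push_cast; ring,
      Int.toNat_natCast]
  simp only [hidx, pvGet]

-- the block list, re-indexed over Nat
lemma pvBlocks_nat (s : List (List (List (List Int)))) (S : Nat) :
    pvBlocks s (S : Int) ((PySem.List.pyGetD s 0 []).length : Int)
      = (List.range s.length).flatMap (fun y : Nat => (List.range S).map (fun d : Nat =>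
          (List.range (PySem.List.pyGetD s 0 []).length).map
            (fun x : Nat => pvGet s (y : Int) (x : Int) (d : Int)))) := by
  unfold pvBlocks
  simp only [pvRangeNat, List.flatMap_map, List.map_map, Function.comp_def]

lemma pvFlatMapMapLength {α : Type} (N S : Nat) (g : Nat → Nat → α) :
    ((List.range N).flatMap (fun y => (List.range S).map (g y))).length = N * S := by
  simp [List.length_flatMap, List.map_const', List.sum_replicate]

lemma pvFlatMapMapGet {α : Type} (N S : Nat) (g : Nat → Nat → α) (j : Nat) (hj : j < N * S) :
    ((List.range N).flatMap (fun y => (List.range S).map (g y)))[j]? = some (g (j / S) (j % S)) := by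
  induction N with
  | zero => omega
  | succ N ih =>
    rw [List.range_succ, List.flatMap_append]
    have hc2 : (N + 1) * S = N * S + S := by ring
    by_cases h : j < N * S
    · rw [List.getElem?_append_left (by rw [pvFlatMapMapLength]; omega), ih h]
    · have hS : 0 < S := by omega
      obtain ⟨r, hjr⟩ : ∃ r, j = N * S + r := ⟨j - N * S, by omega⟩
      subst hjr
      have hr : r < S := by omega
      have hdiv : (N * S + r) / S = N := by
        rw [Nat.mul_comm, Nat.mul_add_div hS, Nat.div_eq_of_lt hr]; omega
      have hmod : (N * S + r) % S = r := by
        rw [Nat.mul_comm, Nat.mul_add_mod, Nat.mod_eq_of_lt hr]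
      rw [List.getElem?_append_right (by rw [pvFlatMapMapLength]; omega), pvFlatMapMapLength,
        hdiv, hmod, Nat.add_sub_cancel_left]
      simp [List.getElem?_range hr]

lemma pvB_eq (subarrays : List (List (List (List Int)))) (slice_dim : Int) :
    merge_from_subarrays_alt subarrays slice_dim =
      (pvBlocks subarrays slice_dim ((PySem.List.pyGetD subarrays 0 []).length : Int)).map List.flatten := by
  by_cases hs : 0 ≤ slice_dim
  · obtain ⟨S, rfl⟩ : ∃ S : Nat, slice_dim = (S : Int) := ⟨slice_dim.toNat, by omega⟩
    rw [pvB_loop, pvBlocks_nat]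
    apply List.ext_getElem?
    intro j
    rw [pvLoopB_getElem?, List.getElem?_map]
    by_cases hj : j < subarrays.length * S
    · rw [if_pos hj, pvFlatMapMapGet _ _ _ _ hj, List.getElem?_replicate, if_pos hj]
      simp
    · rw [if_neg hj, List.getElem?_replicate, if_neg hj,
        List.getElem?_eq_none (by rw [pvFlatMapMapLength]; omega)]
      simp
  · have h0 : slice_dim ≤ 0 := by omega
    unfold merge_from_subarrays_alt pvBlocks
    rw [PySem.List.pyRange_one_eq_nil h0]
    have hrz : ((subarrays.length : Int) * slice_dim) ≤ 0 :=
      mul_nonpos_of_nonneg_of_nonpos (by positivity) h0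
    rw [PySem.List.pyRange_one_eq_nil hrz]
    simp [List.foldl_fixed]

-- ===== VERDICT (by name: the statement is the Claim_ definition above) =====
theorem merge_from_subarrays_spec : Claim_equal_merge_from_subarrays := by
  intro subarrays slice_dim _ hpre
  unfold Spec_merge_from_subarrays
  have hne := hpre.1
  have hdx : 0 < ((PySem.List.pyGetD subarrays 0 []).length : Int) := by
    cases subarrays with
    | nil => exact absurd rfl hne
    | cons a l =>
      have := hpre.2.1
      simp [PySem.List.pyGetD, List.headI] at this ⊢
      omega
  rw [pvA_eq subarrays slice_dim hdx, pvB_eq]
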